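-- pv_equiv track=rewrite | github.com/LinkerTS/mi-plataforma-backend | main.py | _sort_mes_ingreso_counter
-- ===== SOURCE A (Python) =====
-- def _sort_mes_ingreso_counter(counter: dict):
--     # Ordena YYYY-MM de forma cronológica y deja "sin_fecha" (u otros) al final
--     keys_valid = [k for k in counter.keys() if isinstance(k, str) and len(k) == 7 and k[4] == "-"]
--     keys_valid.sort()
--     ordered = {k: counter[k] for k in keys_valid}
--     for k in counter.keys():
--         if k not in ordered:
--             ordered[k] = counter[k]
--     return ordered
-- ===== SOURCE B (Python) =====
-- def _sort_mes_ingreso_counter(counter: dict):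
--     # One stable sort with a composite key: valid "YYYY-MM" keys get (0, k) and sort
--     # chronologically first; all other keys get (1, "") and keep insertion order last.
--     def _key(k):
--         if isinstance(k, str) and len(k) == 7 and k[4] == "-":
--             return (0, k)
--         return (1, "")
--     return {k: counter[k] for k in sorted(counter.keys(), key=_key)}
-- ===== Notes on version B (the rewrite author's own statement) =====
-- stated objective: simpler
-- what changed: A partitions keys into valid/invalid, sorts the valid ones, builds a dict from them and then appends the missing keys in a second guarded loop; B does one stable sort of all keys under a composite key that ranks valid YYYY-MM keys first in lexicographic order and all other keys after, then builds the dict in a single comprehension, relying on sort stability to keep invalid keys in insertion order.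
import Mathlib
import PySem

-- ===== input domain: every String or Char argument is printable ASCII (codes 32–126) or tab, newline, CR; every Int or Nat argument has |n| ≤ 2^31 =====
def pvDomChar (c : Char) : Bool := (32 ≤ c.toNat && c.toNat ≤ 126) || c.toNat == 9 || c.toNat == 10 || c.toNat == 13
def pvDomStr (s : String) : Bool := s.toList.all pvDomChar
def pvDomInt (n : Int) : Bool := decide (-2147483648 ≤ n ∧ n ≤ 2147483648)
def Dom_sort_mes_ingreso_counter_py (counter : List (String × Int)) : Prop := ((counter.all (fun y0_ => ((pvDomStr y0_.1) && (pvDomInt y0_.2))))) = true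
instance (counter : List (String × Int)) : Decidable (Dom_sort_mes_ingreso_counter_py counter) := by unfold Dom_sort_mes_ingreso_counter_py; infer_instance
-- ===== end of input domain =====

-- B replaces A's partition-then-append structure by ONE stable sort of all keys under a
-- composite key ((0, k) for valid "YYYY-MM" keys, (1, "") otherwise): simpler (shorter, one pass).

-- ===== PORT A =====
-- k is a str, len(k) == 7 and k[4] == "-"  (isinstance(k, str) is always true: keys are String)
def pvValidKey (k : String) : Bool := (PySem.Str.len k == 7) && (PySem.Str.pyGet? k 4 == some '-')

def sort_mes_ingreso_counter_py (counter : List (String × Int)) : List (String × Int) :=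
  let d := PySem.Dict.ofList counter
  -- keys_valid = [k for k in counter.keys() if ...]
  let keys_valid := d.keys.filter (fun k => pvValidKey k)
  -- keys_valid.sort()
  let keys_sorted := PySem.List.sorted keys_valid (fun k => k) false
  -- ordered = {k: counter[k] for k in keys_valid}   (counter[k] never raises: k ∈ d.keys, so getD's default is unreachable)
  let ordered := keys_sorted.foldl (fun o k => o.insert k (d.getD k 0)) PySem.Dict.empty
  -- for k in counter.keys(): if k not in ordered: ordered[k] = counter[k]
  let ordered := d.keys.foldl (fun o k => if o.contains k then o else o.insert k (d.getD k 0)) ordered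
  ordered.items

-- ===== PORT B =====
def sort_mes_ingreso_counter_py_alt (counter : List (String × Int)) : List (String × Int) :=
  let d := PySem.Dict.ofList counter
  -- sorted(counter.keys(), key=_key) with _key(k) = (0, k) if valid else (1, "")
  let ks := PySem.List.sorted2 d.keys
      (fun k => if pvValidKey k then (0 : Int) else 1)
      (fun k => if pvValidKey k then k else "") false
  -- {k: counter[k] for k in ks}
  (ks.foldl (fun o k => o.insert k (d.getD k 0)) PySem.Dict.empty).items

-- ===== PRECONDITION & SPEC =====
def Spec_sort_mes_ingreso_counter_py (counter : List (String × Int)) (out : List (String × Int)) : Prop := out = sort_mes_ingreso_counter_py_alt counter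
instance (counter : List (String × Int)) (out : List (String × Int)) : Decidable (Spec_sort_mes_ingreso_counter_py counter out) := by unfold Spec_sort_mes_ingreso_counter_py; infer_instance

-- ===== CLAIM (what is proved, stated in full; the proofs are below) =====
def Claim_equal_sort_mes_ingreso_counter_py : Prop := ∀ (counter : List (String × Int)), Dom_sort_mes_ingreso_counter_py counter → Spec_sort_mes_ingreso_counter_py counter (sort_mes_ingreso_counter_py counter)

-- ===== LEMMAS AND PROOFS =====

-- B's composite-key comparison, as sorted2 unfolds it
def pvLex (a b : String) : Bool :=
  decide ((if pvValidKey a then (0 : Int) else 1) < (if pvValidKey b then (0 : Int) else 1)) ||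
    (!decide ((if pvValidKey b then (0 : Int) else 1) < (if pvValidKey a then (0 : Int) else 1)) &&
      decide ((if pvValidKey a then a else "") < (if pvValidKey b then b else "")))

theorem pvLex_valid_valid {a b : String} (ha : pvValidKey a = true) (hb : pvValidKey b = true) :
    pvLex a b = decide (a < b) := by
  simp [pvLex, ha, hb]

theorem pvLex_valid_invalid {a b : String} (ha : pvValidKey a = true) (hb : pvValidKey b = false) :
    pvLex a b = true := by
  simp [pvLex, ha, hb]

theorem pvLex_invalid {a b : String} (ha : pvValidKey a = false) :
    pvLex a b = false := by
  by_cases hb : pvValidKey b = true <;> simp_all [pvLex]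

theorem insertBy_pvLex_valid (x : String) (hx : pvValidKey x = true) :
    ∀ (S I : List String), (∀ a ∈ S, pvValidKey a = true) → (∀ a ∈ I, pvValidKey a = false) →
      PySem.List.insertBy pvLex x (S ++ I)
        = PySem.List.insertBy (fun a b => decide (a < b)) x S ++ I := by
  intro S
  induction S with
  | nil =>
    intro I _ hI
    cases I with
    | nil => simp [PySem.List.insertBy]
    | cons y ys =>
      have : pvLex x y = true := pvLex_valid_invalid hx (hI y (by simp))
      simp [PySem.List.insertBy, this]
  | cons s S ih =>
    intro I hS hI
    have hs : pvValidKey s = true := hS s (by simp)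
    have hlex : pvLex x s = decide (x < s) := pvLex_valid_valid hx hs
    by_cases h : x < s
    · simp [PySem.List.insertBy, hlex, h]
    · simp only [List.cons_append, PySem.List.insertBy, hlex, decide_eq_true_eq, h,
        if_false]
      rw [ih I (fun a ha => hS a (by simp [ha])) hI]

theorem insertBy_pvLex_invalid (x : String) (hx : pvValidKey x = false) (L : List String) :
    PySem.List.insertBy pvLex x L = L ++ [x] := by
  exact PySem.List.insertBy_of_forall_not_before pvLex x L (fun y _ => pvLex_invalid hx)

-- The composite-key stable insertion sort splits into sorted-valid ++ invalid-in-order.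
theorem foldl_insertBy_split :
    ∀ (xs S I : List String), (∀ a ∈ S, pvValidKey a = true) → (∀ a ∈ I, pvValidKey a = false) →
      xs.foldl (fun acc x => PySem.List.insertBy pvLex x acc) (S ++ I)
        = (xs.filter (fun k => pvValidKey k)).foldl
            (fun acc x => PySem.List.insertBy (fun a b => decide (a < b)) x acc) S
          ++ (I ++ xs.filter (fun k => !pvValidKey k)) := by
  intro xs
  induction xs with
  | nil => intro S I _ _; simp
  | cons x xs ih =>
    intro S I hS hI
    by_cases hx : pvValidKey x = true
    · have h1 := insertBy_pvLex_valid x hx S I hS hI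
      have hS' : ∀ a ∈ PySem.List.insertBy (fun a b => decide (a < b)) x S, pvValidKey a = true := by
        intro a ha
        rcases (PySem.List.mem_insertBy _ x a S).1 ha with h | h
        · exact h ▸ hx
        · exact hS a h
      simp only [List.foldl_cons, h1, List.filter_cons, hx, if_pos, Bool.not_true,
        Bool.false_eq_true]
      rw [ih _ I hS' hI]
      simp
    · have hx' : pvValidKey x = false := by simpa using hx
      have h1 := insertBy_pvLex_invalid x hx' (S ++ I)
      simp only [List.foldl_cons, h1, List.append_assoc]
      rw [ih S (I ++ [x]) hS (by intro a ha; rcases List.mem_append.1 ha with h | h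
                                 · exact hI a h
                                 · simp at h; exact h ▸ hx')]
      simp [hx']

-- A's guarded second loop appends exactly the not-yet-present keys, in order.
theorem guard_loop_items (v : String → Int) :
    ∀ (xs : List String) (o : PySem.Dict String Int), xs.Nodup →
      (xs.foldl (fun o k => if o.contains k then o else o.insert k (v k)) o).items
        = o.items ++ (xs.filter (fun k => !o.contains k)).map (fun k => (k, v k)) := by
  intro xs
  induction xs with
  | nil => intro o _; simp
  | cons x xs ih =>
    intro o hnd
    have hnd' : xs.Nodup := hnd.of_cons
    have hx : x ∉ xs := by simp [List.nodup_cons] at hnd; exact hnd.1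
    by_cases h : o.contains x = true
    · simp only [List.foldl_cons, h, if_pos, List.filter_cons, Bool.not_true,
        Bool.false_eq_true]
      rw [ih o hnd']
      simp
    · have h' : o.contains x = false := by simpa using h
      simp only [List.foldl_cons, h', Bool.false_eq_true, if_false, List.filter_cons]
      rw [ih _ hnd']
      have hfc : xs.filter (fun k => !(o.insert x (v x)).contains k)
          = xs.filter (fun k => !o.contains k) := by
        apply List.filter_congr
        intro k hk
        have hne : k ≠ x := fun he => hx (he ▸ hk)
        simp [PySem.Dict.contains_insert, hne]
      rw [hfc, PySem.Dict.items_insert_of_not_contains o (v x) h']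
      simp

theorem sort_mes_ingreso_counter_py_eq (counter : List (String × Int)) :
    sort_mes_ingreso_counter_py counter = sort_mes_ingreso_counter_py_alt counter := by
  unfold sort_mes_ingreso_counter_py sort_mes_ingreso_counter_py_alt
  simp only []
  set d := PySem.Dict.ofList counter with hd
  have hknd : d.keys.Nodup := PySem.Dict.nodup_keys_ofList counter
  set kv := d.keys.filter (fun k => pvValidKey k) with hkv
  set ks := PySem.List.sorted kv (fun k => k) false with hks
  -- the composite sort splits
  have hsplit : PySem.List.sorted2 d.keys
      (fun k => if pvValidKey k then (0 : Int) else 1)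
      (fun k => if pvValidKey k then k else "") false
      = ks ++ d.keys.filter (fun k => !pvValidKey k) := by
    have h0 : PySem.List.sorted2 d.keys
        (fun k => if pvValidKey k then (0 : Int) else 1)
        (fun k => if pvValidKey k then k else "") false
        = d.keys.foldl (fun acc x => PySem.List.insertBy pvLex x acc) [] := rfl
    have h1 := foldl_insertBy_split d.keys [] [] (by simp) (by simp)
    simp only [List.nil_append] at h1
    rw [h0, h1, hks, PySem.List.sorted_eq_foldl_insertBy kv (fun k => k)]
  -- nodup facts
  have hkvnd : kv.Nodup := hknd.filter _
  have hksnd : ks.Nodup := ((PySem.List.sorted_perm kv (fun k => k) false).nodup_iff).2 hkvnd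
  have hmemks : ∀ k, k ∈ ks ↔ (k ∈ d.keys ∧ pvValidKey k = true) := by
    intro k
    rw [hks, PySem.List.mem_sorted, hkv, List.mem_filter]
  -- A's first phase: fresh inserts from empty
  have hA1 : (ks.foldl (fun o k => o.insert k (d.getD k 0)) PySem.Dict.empty).items
      = ks.map (fun k => (k, d.getD k 0)) := by
    have := PySem.Dict.items_foldl_insert_fresh ks (fun a => a) (fun a => d.getD a 0)
      PySem.Dict.empty (fun a _ => PySem.Dict.contains_empty a) (by simpa using hksnd)
    simpa using this
  set o0 := ks.foldl (fun o k => o.insert k (d.getD k 0)) PySem.Dict.empty with ho0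
  -- what o0 contains
  have hco0 : ∀ k ∈ d.keys, o0.contains k = pvValidKey k := by
    intro k hk
    have hkeys : o0.keys = PySem.Set.ofList ks := by
      rw [ho0]
      have := PySem.Dict.keys_foldl_insert ks (fun o k => d.getD k 0) (PySem.Dict.empty (κ := String) (ν := Int))
      simpa [PySem.Set.update, PySem.Set.ofList_eq_foldl] using this
    by_cases h : pvValidKey k = true
    · rw [h, PySem.Dict.contains_iff_mem_keys, hkeys, PySem.Set.mem_ofList, hmemks]
      exact ⟨hk, h⟩
    · have h' : pvValidKey k = false := by simpa using h
      rw [h']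
      by_contra hc
      have : o0.contains k = true := by simpa using hc
      rw [PySem.Dict.contains_iff_mem_keys, hkeys, PySem.Set.mem_ofList, hmemks] at this
      rw [this.2] at h'; exact Bool.true_eq_false.mp h'
  -- A's second phase
  rw [guard_loop_items (fun k => d.getD k 0) d.keys o0 hknd]
  have hfilt : d.keys.filter (fun k => !o0.contains k) = d.keys.filter (fun k => !pvValidKey k) := by
    apply List.filter_congr
    intro k hk
    rw [hco0 k hk]
  rw [hfilt, hA1]
  -- B's side: fresh inserts of the split list
  have hBnd : (ks ++ d.keys.filter (fun k => !pvValidKey k)).Nodup := by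
    rw [← hsplit]
    exact ((PySem.List.sorted2_perm d.keys _ _ false).nodup_iff).2 hknd
  have hB : ((ks ++ d.keys.filter (fun k => !pvValidKey k)).foldl
      (fun o k => o.insert k (d.getD k 0)) PySem.Dict.empty).items
      = (ks ++ d.keys.filter (fun k => !pvValidKey k)).map (fun k => (k, d.getD k 0)) := by
    have := PySem.Dict.items_foldl_insert_fresh (ks ++ d.keys.filter (fun k => !pvValidKey k))
      (fun a => a) (fun a => d.getD a 0) PySem.Dict.empty
      (fun a _ => PySem.Dict.contains_empty a) (by simpa using hBnd)
    simpa using this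
  rw [hsplit, hB, List.map_append]

-- ===== VERDICT (by name: the statement is the Claim_ definition above) =====
theorem sort_mes_ingreso_counter_py_spec : Claim_equal_sort_mes_ingreso_counter_py := by
  intro counter _
  unfold Spec_sort_mes_ingreso_counter_py
  exact sort_mes_ingreso_counter_py_eq counter
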